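-- pv_equiv track=rewrite | github.com/yananfei-Bette/Leetcode | interview/peak6.py | closing_time
-- ===== SOURCE A (Python) =====
-- def closing_time(Queue, admission, runningCost):
-- 	if not Queue:
-- 		return 0
--
-- 	maxProfit = 0
-- 	currProfit = 0
-- 	time = -1
-- 	left = 0
--
-- 	for i in range(len(Queue)):
-- 		currPeople = Queue[i] + left
-- 		if currPeople <= 4:
-- 			left = 0
-- 			currProfit += admission * currPeople - runningCost
-- 		else:
-- 			left = currPeople - 4
-- 			currProfit += admission * 4 - runningCost
--
-- 		if currProfit > maxProfit:
-- 			maxProfit = currProfit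
-- 			time = i
-- 	return time if maxProfit > 0 else -1
-- ===== SOURCE B (Python) =====
-- def closing_time(Queue, admission, runningCost):
--     if not Queue:
--         return 0
--     # Cumulative boarded after hour i obeys b = min(b_prev + 4, prefix_sum):
--     # profit after hour i is then admission*b - runningCost*(i+1) directly,
--     # with no per-hour "left"/"boarded" bookkeeping.
--     profits = []
--     s = 0
--     b = 0
--     for i, q in enumerate(Queue):
--         s += q
--         b = min(b + 4, s)
--         profits.append(admission * b - runningCost * (i + 1))
--     # Right-to-left scan: a non-strict >= keeps the LEFTMOST maximum.
--     best = None
--     time = -1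
--     for i, p in reversed(list(enumerate(profits))):
--         if best is None or p >= best:
--             best = p
--             time = i
--     return time if best > 0 else -1
-- ===== Notes on version B (the rewrite author's own statement) =====
-- stated objective: alternative
-- what changed: B drops A's per-hour boarding simulation (left/boarded bookkeeping and fused running-max): it maintains the prefix sum and cumulative boarded count via b = min(b+4, prefix_sum), computes each hour's profit by the closed form admission*b - runningCost*(i+1), and finds the earliest best hour with a right-to-left scan whose non-strict >= keeps the leftmost maximum.
import Mathlib
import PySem

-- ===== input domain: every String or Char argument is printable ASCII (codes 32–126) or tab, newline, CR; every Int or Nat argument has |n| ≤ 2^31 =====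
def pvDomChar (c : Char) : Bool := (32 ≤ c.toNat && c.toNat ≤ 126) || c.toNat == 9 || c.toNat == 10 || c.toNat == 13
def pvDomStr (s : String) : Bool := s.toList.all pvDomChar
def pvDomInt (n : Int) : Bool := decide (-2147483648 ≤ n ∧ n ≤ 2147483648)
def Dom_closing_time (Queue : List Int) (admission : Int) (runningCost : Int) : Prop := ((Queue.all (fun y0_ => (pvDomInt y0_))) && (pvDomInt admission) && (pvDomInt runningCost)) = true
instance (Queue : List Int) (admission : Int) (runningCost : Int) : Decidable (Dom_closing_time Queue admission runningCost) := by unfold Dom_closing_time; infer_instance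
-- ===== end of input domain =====

-- B replaces A's per-hour boarding simulation (left/boarded bookkeeping fused with a running max)
-- by the closed form profit_i = admission*b_i - runningCost*(i+1) with b_i = min(b_{i-1}+4, prefix_sum_i),
-- and finds the earliest best hour with a right-to-left >=-scan (objective: alternative).

-- ===== PORT A =====
-- state: (maxProfit, currProfit, time, left)
def closing_time (Queue : List Int) (admission : Int) (runningCost : Int) : Int :=
  if Queue = [] then 0
  else
    let s := (PySem.List.pyRange 0 (Queue.length : Int) 1).foldl
      (fun (st : Int × Int × Int × Int) i =>
        let maxP := st.1; let currP := st.2.1; let time := st.2.2.1; let left := st.2.2.2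
        let currPeople := PySem.List.pyGetD Queue i 0 + left
        let left' := if currPeople ≤ 4 then (0 : Int) else currPeople - 4
        let currP' := if currPeople ≤ 4 then currP + (admission * currPeople - runningCost)
                      else currP + (admission * 4 - runningCost)
        if currP' > maxP then (currP', currP', i, left') else (maxP, currP', time, left'))
      (0, 0, -1, 0)
    if s.1 > 0 then s.2.2.1 else -1

-- ===== PORT B =====
-- pass 1 state: (s, b, profits); pass 2 state: (best : Option Int, time)
def closing_time_alt (Queue : List Int) (admission : Int) (runningCost : Int) : Int :=
  if Queue = [] then 0
  else
    let r := (PySem.List.enumerate Queue 0).foldl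
      (fun (st : Int × Int × List Int) (p : Int × Int) =>
        let s := st.1; let b := st.2.1; let profits := st.2.2
        let s' := s + p.2
        let b' := min (b + 4) s'
        (s', b', profits ++ [admission * b' - runningCost * (p.1 + 1)]))
      (0, 0, [])
    let profits := r.2.2
    let sc := ((PySem.List.enumerate profits 0).reverse).foldl
      (fun (st : Option Int × Int) (p : Int × Int) =>
        match st.1 with
        | none => (some p.2, p.1)
        | some best => if p.2 ≥ best then (some p.2, p.1) else st)
      (none, -1)
    match sc.1 with
    | some best => if best > 0 then sc.2 else -1
    | none => -1  -- unreachable: Queue ≠ [] so profits ≠ []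

-- ===== PRECONDITION & SPEC =====
def Spec_closing_time (Queue : List Int) (admission : Int) (runningCost : Int) (out : Int) : Prop := out = closing_time_alt Queue admission runningCost
instance (Queue : List Int) (admission : Int) (runningCost : Int) (out : Int) : Decidable (Spec_closing_time Queue admission runningCost out) := by unfold Spec_closing_time; infer_instance

-- ===== CLAIM (what is proved, stated in full; the proofs are below) =====
def Claim_equal_closing_time : Prop := ∀ (Queue : List Int) (admission : Int) (runningCost : Int), Dom_closing_time Queue admission runningCost → Spec_closing_time Queue admission runningCost (closing_time Queue admission runningCost)

-- ===== LEMMAS AND PROOFS =====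

-- the list of cumulative profits of A's simulation, as a structural recursion
def pvProfs (adm rc : Int) : List Int → Int → Int → List Int
  | [], _, _ => []
  | q :: rest, left, total =>
    let waiting := q + left
    let boarded := min 4 waiting
    let total' := total + (adm * boarded - rc)
    total' :: pvProfs adm rc rest (waiting - boarded) total'

-- A's max/argmax tracking, abstracted over the profit list
def pvScan : List Int → Int → Int → Int → Int × Int
  | [], maxP, time, _ => (maxP, time)
  | p :: ps, maxP, time, i =>
    if p > maxP then pvScan ps p i (i + 1) else pvScan ps maxP time (i + 1)

theorem pvScan_of_le : ∀ (ps : List Int) (maxP time i : Int),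
    (∀ p ∈ ps, p ≤ maxP) → pvScan ps maxP time i = (maxP, time) := by
  intro ps
  induction ps with
  | nil => intro _ _ _ _; rfl
  | cons p ps ih =>
      intro maxP time i h
      have hp : p ≤ maxP := h p (by simp)
      simp only [pvScan, if_neg (by omega : ¬ p > maxP)]
      exact ih maxP time (i + 1) (fun q hq => h q (by simp [hq]))

theorem pvScan_of_lt : ∀ (ps : List Int) (m maxP time i : Int),
    PySem.List.max? ps (fun x => x) = some m → maxP < m →
    pvScan ps maxP time i = (m, i + ((PySem.List.index? ps m).getD 0 : Nat)) := by
  intro ps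
  induction ps with
  | nil => intro m maxP time i hm; simp [PySem.List.max?] at hm
  | cons p ps ih =>
      intro m maxP time i hm hlt
      have hmem : m ∈ p :: ps := PySem.List.max?_mem hm
      have hmax : ∀ y ∈ p :: ps, y ≤ m := by
        intro y hy; exact PySem.List.max?_isMax hm y hy
      by_cases hpm : p = m
      · subst hpm
        have hup : p > maxP := hlt
        simp only [pvScan, if_pos hup]
        rw [pvScan_of_le ps p i (i + 1) (fun q hq => hmax q (by simp [hq]))]
        rw [PySem.List.index?_cons_self]
        simp
      · have hpm' : p < m := lt_of_le_of_ne (hmax p (by simp)) hpm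
        have hmrest : m ∈ ps := by
          rcases List.mem_cons.mp hmem with h | h
          · exact absurd h.symm hpm
          · exact h
        have hrest : PySem.List.max? ps (fun x => x) = some m := by
          rcases h : PySem.List.max? ps (fun x => x) with _ | m'
          · have : ps = [] := (PySem.List.max?_eq_none_iff _ _).mp h
            rw [this] at hmrest; simp at hmrest
          · have h1 : m ≤ m' := PySem.List.max?_isMax h m hmrest
            have h2 : m' ≤ m := hmax m' (List.mem_cons_of_mem _ (PySem.List.max?_mem h))
            have : m' = m := le_antisymm h2 h1
            rw [this]
        rcases hk : PySem.List.index? ps m with _ | k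
        · exact absurd ((PySem.List.index?_eq_none_iff _ _).mp hk) (by simp [hmrest])
        · have hidx : PySem.List.index? (p :: ps) m = some (k + 1) := by
            rw [PySem.List.index?_cons_of_ne ps hpm, hk]; rfl
          by_cases hup : p > maxP
          · simp only [pvScan, if_pos hup]
            rw [ih m p i (i + 1) hrest hpm', hk, hidx]
            simp; omega
          · simp only [pvScan, if_neg hup]
            rw [ih m maxP time (i + 1) hrest hlt, hk, hidx]
            simp; omega

-- A's enumerate-style fold equals pvScan over the cumulative-profit list
theorem foldA_eq (adm rc : Int) : ∀ (Q : List Int) (s maxP currP time left : Int),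
    (((PySem.List.enumerate Q s).foldl
        (fun (st : Int × Int × Int × Int) (p : Int × Int) =>
          let maxP := st.1; let currP := st.2.1; let time := st.2.2.1; let left := st.2.2.2
          let currPeople := p.2 + left
          let left' := if currPeople ≤ 4 then (0 : Int) else currPeople - 4
          let currP' := if currPeople ≤ 4 then currP + (adm * currPeople - rc)
                        else currP + (adm * 4 - rc)
          if currP' > maxP then (currP', currP', p.1, left') else (maxP, currP', time, left'))
        (maxP, currP, time, left)).1,
      ((PySem.List.enumerate Q s).foldl
        (fun (st : Int × Int × Int × Int) (p : Int × Int) =>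
          let maxP := st.1; let currP := st.2.1; let time := st.2.2.1; let left := st.2.2.2
          let currPeople := p.2 + left
          let left' := if currPeople ≤ 4 then (0 : Int) else currPeople - 4
          let currP' := if currPeople ≤ 4 then currP + (adm * currPeople - rc)
                        else currP + (adm * 4 - rc)
          if currP' > maxP then (currP', currP', p.1, left') else (maxP, currP', time, left'))
        (maxP, currP, time, left)).2.2.1)
    = pvScan (pvProfs adm rc Q left currP) maxP time s := by
  intro Q
  induction Q with
  | nil =>
      intro s maxP currP time left
      simp [PySem.List.enumerate, pvProfs, pvScan]
  | cons q rest ih =>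
      intro s maxP currP time left
      rw [PySem.List.enumerate_cons]
      simp only [List.foldl_cons, pvProfs]
      have hmin : min (4 : Int) (q + left) =
          if q + left ≤ 4 then q + left else 4 := by
        split_ifs with h <;> omega
      by_cases h4 : q + left ≤ 4
      · simp only [if_pos h4, hmin, sub_self]
        by_cases hup : currP + (adm * (q + left) - rc) > maxP
        · simp only [if_pos hup, pvScan]
          exact ih (s + 1) _ _ s 0
        · simp only [if_neg hup, pvScan]
          exact ih (s + 1) maxP _ time 0
      · simp only [if_neg h4, hmin]
        by_cases hup : currP + (adm * 4 - rc) > maxP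
        · simp only [if_pos hup, pvScan]
          exact ih (s + 1) _ _ s _
        · simp only [if_neg hup, pvScan]
          exact ih (s + 1) maxP _ time _

-- B's prefix-sum pass produces exactly A's cumulative-profit list
theorem foldB1_eq (adm rc : Int) : ∀ (Q : List Int) (i s b : Int) (acc : List Int),
    ((PySem.List.enumerate Q i).foldl
      (fun (st : Int × Int × List Int) (p : Int × Int) =>
        let s := st.1; let b := st.2.1; let profits := st.2.2
        let s' := s + p.2
        let b' := min (b + 4) s'
        (s', b', profits ++ [adm * b' - rc * (p.1 + 1)]))
      (s, b, acc)).2.2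
    = acc ++ pvProfs adm rc Q (s - b) (adm * b - rc * i) := by
  intro Q
  induction Q with
  | nil => intro i s b acc; simp [PySem.List.enumerate, pvProfs]
  | cons q rest ih =>
      intro i s b acc
      rw [PySem.List.enumerate_cons]
      simp only [List.foldl_cons, pvProfs]
      rw [ih]
      have hb' : min (b + 4) (s + q) = b + min 4 (q + (s - b)) := by omega
      have h1 : adm * (min (b + 4) (s + q)) - rc * (i + 1)
          = (adm * b - rc * i) + (adm * min 4 (q + (s - b)) - rc) := by
        rw [hb']; ring
      have h2 : (s + q) - min (b + 4) (s + q) = (q + (s - b)) - min 4 (q + (s - b)) := by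
        omega
      rw [h1, h2]
      simp

-- B's reversed foldl as a structural recursion (its foldr form)
def pvRScan : List (Int × Int) → Option Int × Int
  | [] => (none, -1)
  | p :: rest =>
    let st := pvRScan rest
    match st.1 with
    | none => (some p.2, p.1)
    | some best => if p.2 ≥ best then (some p.2, p.1) else st

theorem foldl_rev_eq_pvRScan : ∀ (l : List (Int × Int)),
    (l.reverse).foldl
      (fun (st : Option Int × Int) (p : Int × Int) =>
        match st.1 with
        | none => (some p.2, p.1)
        | some best => if p.2 ≥ best then (some p.2, p.1) else st)
      (none, -1)
    = pvRScan l := by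
  intro l
  rw [List.foldl_reverse]
  induction l with
  | nil => rfl
  | cons p rest ih => simp only [List.foldr_cons, pvRScan, ih]

theorem foldl_max_init (l : List Int) : ∀ a b : Int, l.foldl max (max a b) = max a (l.foldl max b) := by
  induction l with
  | nil => intro a b; rfl
  | cons x t ih =>
      intro a b
      simp only [List.foldl_cons, max_assoc, ih]

-- the reversed >=-scan returns the maximum and its earliest index
theorem pvRScan_enum : ∀ (ps : List Int) (i m : Int),
    PySem.List.max? ps (fun x => x) = some m →
    pvRScan (PySem.List.enumerate ps i) = (some m, i + ((PySem.List.index? ps m).getD 0 : Nat)) := by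
  intro ps
  induction ps with
  | nil => intro i m hm; simp [PySem.List.max?] at hm
  | cons p rest ih =>
      intro i m hm
      rw [PySem.List.max?_id_cons] at hm
      rcases rest with _ | ⟨r, rs⟩
      · -- singleton: m = p
        simp only [List.foldl_nil, Option.some.injEq] at hm
        subst hm
        rw [PySem.List.enumerate_cons, PySem.List.enumerate_nil]
        simp [pvRScan]
      · -- rest nonempty: let m' be rest's maximum
        have hm' : PySem.List.max? (r :: rs) (fun x => x) = some (rs.foldl max r) :=
          PySem.List.max?_id_cons r rs
        have hsplit : (r :: rs).foldl max p = max p (rs.foldl max r) := by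
          simp only [List.foldl_cons]
          rw [show max p r = max p (max r r) from by simp, foldl_max_init]
          simp
        rw [hsplit] at hm
        simp only [Option.some.injEq] at hm
        rw [PySem.List.enumerate_cons]
        simp only [pvRScan]
        rw [ih (i + 1) (rs.foldl max r) hm']
        by_cases hge : p ≥ rs.foldl max r
        · have hme : m = p := by rw [← hm]; omega
          subst hme
          simp only [if_pos hge]
          rw [PySem.List.index?_cons_self]
          simp
        · have hme : m = rs.foldl max r := by rw [← hm]; omega
          subst hme
          simp only [if_neg hge]
          have hmem : rs.foldl max r ∈ r :: rs := PySem.List.max?_mem hm'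
          rcases hk : PySem.List.index? (r :: rs) (rs.foldl max r) with _ | k
          · exact absurd ((PySem.List.index?_eq_none_iff _ _).mp hk) (by simp [hmem])
          · have hpm : p ≠ rs.foldl max r := by omega
            rw [PySem.List.index?_cons_of_ne _ hpm, hk]
            simp only [Option.map_some, Option.getD_some, Prod.mk.injEq, true_and]
            push_cast; omega

theorem pvProfs_ne_nil (adm rc : Int) (q : Int) (rest : List Int) (left total : Int) :
    pvProfs adm rc (q :: rest) left total ≠ [] := by
  simp [pvProfs]

-- ===== VERDICT (by name: the statement is the Claim_ definition above) =====
theorem closing_time_spec : Claim_equal_closing_time := by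
  unfold Claim_equal_closing_time
  intro Queue adm rc _
  unfold Spec_closing_time closing_time closing_time_alt
  by_cases hQ : Queue = []
  · simp [hQ]
  · rw [if_neg hQ, if_neg hQ]
    have key := foldA_eq adm rc Queue 0 0 0 (-1) 0
    have he := PySem.List.enumerate_eq_map_pyRange Queue (0 : Int)
    rw [he, List.foldl_map] at key
    simp only [PySem.List.len_eq] at key
    have hB1 := foldB1_eq adm rc Queue 0 0 0 []
    simp only [List.nil_append, mul_zero, sub_self] at hB1
    simp only [hB1, foldl_rev_eq_pvRScan]
    rcases hmax : PySem.List.max? (pvProfs adm rc Queue 0 0) (fun x => x) with _ | m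
    · have : pvProfs adm rc Queue 0 0 = [] := (PySem.List.max?_eq_none_iff _ _).mp hmax
      rcases Queue with _ | ⟨q, rest⟩
      · exact absurd rfl hQ
      · exact absurd this (pvProfs_ne_nil adm rc q rest 0 0)
    · rw [pvRScan_enum (pvProfs adm rc Queue 0 0) 0 m hmax]
      by_cases hm : m > 0
      · have hscan := pvScan_of_lt (pvProfs adm rc Queue 0 0) m 0 (-1) 0 hmax (by omega)
        rw [hscan] at key
        have k1 := congrArg Prod.fst key
        have k2 := congrArg (fun p : Int × Int => p.2) key
        simp only [] at k1 k2
        rw [k1, k2]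
      · have hle : ∀ p ∈ pvProfs adm rc Queue 0 0, p ≤ (0 : Int) := by
          intro p hp
          have := PySem.List.max?_isMax hmax p hp
          simp only [] at this
          omega
        rw [pvScan_of_le _ 0 (-1) 0 hle] at key
        have k1 := congrArg Prod.fst key
        simp only [] at k1
        rw [k1]
        simp [hm]
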